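-- pv_equiv track=rewrite | github.com/rumen89/HackBulgaria | week3/4-Problems-Construction/lyunin_city.py | how_many_blocks_can_see
-- ===== SOURCE A (Python) =====
-- def how_many_blocks_can_see(blocks):
--     if len(blocks) == 0:
--         return 0
--
--     seen = 1
--     current_max = blocks[0]
--     for block in blocks:
--         if block > current_max:
--             current_max = block
--             seen += 1
--     return seen
-- ===== SOURCE B (Python) =====
-- def how_many_blocks_can_see(blocks):
--     if len(blocks) == 0:
--         return 0
--
--     def go(lo, hi, m):
--         # (count of new maxima in blocks[lo:hi] given current max m, updated max)
--         if hi - lo <= 1: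
--             x = blocks[lo]
--             if x > m:
--                 return 1, x
--             return 0, m
--         mid = (lo + hi) // 2
--         c1, m1 = go(lo, mid, m)
--         c2, m2 = go(mid, hi, m1)
--         return c1 + c2, m2
--
--     return 1 + go(0, len(blocks), blocks[0])[0]
-- ===== Notes on version B (the rewrite author's own statement) =====
-- stated objective: alternative
-- what changed: Replaces the left-to-right running-max scan by a divide-and-conquer recursion that halves the index range, threads the running maximum from the left half into the right half and sums the two counts.
import Mathlib
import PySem

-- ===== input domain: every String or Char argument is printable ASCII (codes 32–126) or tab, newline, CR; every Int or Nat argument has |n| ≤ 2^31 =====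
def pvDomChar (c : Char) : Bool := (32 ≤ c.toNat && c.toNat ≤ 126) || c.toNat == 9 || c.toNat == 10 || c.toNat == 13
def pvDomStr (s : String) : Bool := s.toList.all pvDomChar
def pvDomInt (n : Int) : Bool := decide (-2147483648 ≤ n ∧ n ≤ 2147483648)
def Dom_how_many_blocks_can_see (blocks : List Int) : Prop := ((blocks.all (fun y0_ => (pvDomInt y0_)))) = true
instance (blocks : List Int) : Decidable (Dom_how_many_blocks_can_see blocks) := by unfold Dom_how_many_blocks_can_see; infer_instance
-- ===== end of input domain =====

-- B replaces A's single left-to-right running-max scan by a divide-and-conquer recursion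
-- over index ranges (alternative decomposition, same O(n) work; return values proved equal).

-- ===== PORT A =====
def how_many_blocks_can_see (blocks : List Int) : Int :=
  match blocks with
  | [] => 0
  | b0 :: _ =>
    -- seen = 1; current_max = blocks[0]; for block in blocks: …
    (blocks.foldl
      (fun (st : Int × Int) block => if block > st.2 then (st.1 + 1, block) else st)
      (1, b0)).1

-- ===== PORT B =====
-- inner helper 'go(lo, hi, m)' of Source B; blocks[lo] is in range whenever go is reached
def how_many_blocks_can_see_go (blocks : List Int) (lo hi m : Int) : Int × Int :=
  if hi - lo ≤ 1 then
    let x := PySem.List.pyGetD blocks lo 0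
    if x > m then (1, x) else (0, m)
  else
    let mid := PySem.Int.floordiv (lo + hi) 2
    let p1 := how_many_blocks_can_see_go blocks lo mid m
    let p2 := how_many_blocks_can_see_go blocks mid hi p1.2
    (p1.1 + p2.1, p2.2)
termination_by (hi - lo).toNat
decreasing_by
  all_goals
    simp only [PySem.Int.floordiv_eq_ediv_of_pos (by norm_num : (0:Int) < 2)] at *
    omega

def how_many_blocks_can_see_alt (blocks : List Int) : Int :=
  if blocks.length == 0 then 0
  else 1 + (how_many_blocks_can_see_go blocks 0 (blocks.length : Int)
              (PySem.List.pyGetD blocks 0 0)).1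

-- ===== PRECONDITION & SPEC =====
def Spec_how_many_blocks_can_see (blocks : List Int) (out : Int) : Prop := out = how_many_blocks_can_see_alt blocks
instance (blocks : List Int) (out : Int) : Decidable (Spec_how_many_blocks_can_see blocks out) := by unfold Spec_how_many_blocks_can_see; infer_instance

-- ===== CLAIM (what is proved, stated in full; the proofs are below) =====
def Claim_equal_how_many_blocks_can_see : Prop := ∀ (blocks : List Int), Dom_how_many_blocks_can_see blocks → Spec_how_many_blocks_can_see blocks (how_many_blocks_can_see blocks)

-- ===== LEMMAS AND PROOFS =====

/-- Count of strict new maxima in `xs`, starting from current max `m`. -/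
def visCount (m : Int) (xs : List Int) : Int :=
  match xs with
  | [] => 0
  | y :: ys => if m < y then 1 + visCount y ys else visCount m ys

theorem foldlA_eq (xs : List Int) : ∀ (s m : Int),
    xs.foldl (fun (st : Int × Int) block => if block > st.2 then (st.1 + 1, block) else st) (s, m)
      = (s + visCount m xs, xs.foldl max m) := by
  induction xs with
  | nil => intro s m; simp [visCount]
  | cons y ys ih =>
    intro s m
    simp only [List.foldl_cons, visCount]
    by_cases h : m < y
    · simp [h, ih, max_eq_right (le_of_lt h), add_assoc]
    · simp [h, ih, max_eq_left (le_of_not_gt h)]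

theorem visCount_append (s : List Int) : ∀ (t : List Int) (m : Int),
    visCount m (s ++ t) = visCount m s + visCount (s.foldl max m) t := by
  induction s with
  | nil => intro t m; simp [visCount]
  | cons y ys ih =>
    intro t m
    by_cases h : m < y
    · simp [visCount, h, ih, max_eq_right (le_of_lt h), add_assoc]
    · simp [visCount, h, ih, max_eq_left (le_of_not_gt h)]

/-- the segment blocks[lo:hi] for natural bounds -/
def seg (blocks : List Int) (a b : Nat) : List Int := (blocks.drop a).take (b - a)

theorem seg_split (blocks : List Int) (a b c : Nat) (hab : a ≤ b) (hbc : b ≤ c) :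
    seg blocks a c = seg blocks a b ++ seg blocks b c := by
  unfold seg
  rw [show c - a = (b - a) + (c - b) by omega, List.take_add, List.drop_drop,
      show a + (b - a) = b by omega]

theorem seg_single (blocks : List Int) (a : Nat) (ha : a < blocks.length) :
    seg blocks a (a + 1) = [blocks[a]] := by
  unfold seg
  rw [show a + 1 - a = 1 by omega]
  rw [List.take_one, List.head?_drop]
  simp [List.getElem?_eq_getElem ha]

theorem go_spec (blocks : List Int) (lo hi : Int) (m : Int)
    (h0 : 0 ≤ lo) (hlh : lo < hi) (hhi : hi ≤ (blocks.length : Int)) :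
    how_many_blocks_can_see_go blocks lo hi m
      = (visCount m (seg blocks lo.toNat hi.toNat),
         (seg blocks lo.toNat hi.toNat).foldl max m) := by
  generalize hn : (hi - lo).toNat = n
  induction n using Nat.strong_induction_on generalizing lo hi m with
  | _ n ih =>
    rw [how_many_blocks_can_see_go]
    by_cases hb : hi - lo ≤ 1
    · have hhi' : hi = lo + 1 := by omega
      have hlt : lo.toNat < blocks.length := by omega
      have hseg : seg blocks lo.toNat hi.toNat = [blocks[lo.toNat]] := by
        rw [show hi.toNat = lo.toNat + 1 by omega]
        exact seg_single blocks _ hlt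
      have hget : PySem.List.pyGetD blocks lo 0 = blocks[lo.toNat] :=
        PySem.List.pyGetD_eq_getElem blocks 0 h0 (by omega)
      simp only [hb, if_true, hseg, hget, visCount]
      by_cases h : m < blocks[lo.toNat]
      · simp [h, max_eq_right (le_of_lt h)]
      · simp [h, max_eq_left (le_of_not_gt h)]
    · simp only [hb, if_false]
      have h2 : lo + 2 ≤ hi := by omega
      set mid := PySem.Int.floordiv (lo + hi) 2 with hmid
      have hmid' : mid = (lo + hi) / 2 := by
        rw [hmid, PySem.Int.floordiv_eq_ediv_of_pos (by norm_num : (0:Int) < 2)]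
      have hlm : lo < mid := by omega
      have hmh : mid < hi := by omega
      rw [ih (hi - mid).toNat (by omega) mid hi _ (by omega) hmh hhi rfl,
          ih (mid - lo).toNat (by omega) lo mid m h0 hlm (by omega) rfl]
      have hsplit : seg blocks lo.toNat hi.toNat
          = seg blocks lo.toNat mid.toNat ++ seg blocks mid.toNat hi.toNat :=
        seg_split blocks _ _ _ (by omega) (by omega)
      rw [hsplit, visCount_append, List.foldl_append]

theorem how_many_blocks_can_see_spec : Claim_equal_how_many_blocks_can_see := by
  unfold Claim_equal_how_many_blocks_can_see Spec_how_many_blocks_can_see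
  intro blocks _
  match blocks with
  | [] => rfl
  | x :: xs =>
    rw [show how_many_blocks_can_see (x :: xs)
          = ((x :: xs).foldl
              (fun (st : Int × Int) block => if block > st.2 then (st.1 + 1, block) else st)
              (1, x)).1 from rfl]
    rw [foldlA_eq]
    have hget : PySem.List.pyGetD (x :: xs) 0 0 = x := by
      rw [PySem.List.pyGetD_eq_getElem (x :: xs) 0 (le_refl 0) (by simp)]
      rfl
    rw [show how_many_blocks_can_see_alt (x :: xs)
          = 1 + (how_many_blocks_can_see_go (x :: xs) 0 ((x :: xs).length : Int)
                  (PySem.List.pyGetD (x :: xs) 0 0)).1 from by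
        simp [how_many_blocks_can_see_alt]]
    rw [hget, go_spec (x :: xs) 0 ((x :: xs).length : Int) x (le_refl 0)
          (by simp) (le_refl _)]
    have hseg : seg (x :: xs) (0:Int).toNat ((x :: xs).length : Int).toNat = x :: xs := by
      simp [seg]
    rw [hseg]
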